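-- pv_equiv track=rewrite | github.com/ElliotStein/mergekit | mergekit/plot_tools/plot_tools.py | categorise_layers
-- ===== SOURCE A (Python) =====
-- from typing import List, Dict, Optional, Any, Tuple
--
-- def categorise_layers(layer_names) -> List[str]:
--     # Hardcoded layernames for now - can be extended to include more categories or further generalised based on config
--     categories = []
--     for name in layer_names:
--         if 'Attention Block' in name:
--             categories.append('Attention Block')
--         elif 'mlp' in name:
--             categories.append('MLP')
--         elif 'layernorm' in name:
--             categories.append('LayerNorm')
--         else:
--             categories.append('Other')
--     return categories
-- ===== SOURCE B (Python) =====
-- def categorise_layers(layer_names):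
--     # Staged overwrite: start all-'Other', then apply rules from lowest to
--     # highest priority, each pass overwriting matches; the last pass wins,
--     # which reproduces the elif priority of the original chain.
--     cats = ['Other'] * len(layer_names)
--     for sub, label in [('layernorm', 'LayerNorm'),
--                        ('mlp', 'MLP'),
--                        ('Attention Block', 'Attention Block')]:
--         cats = [label if sub in name else cat
--                 for name, cat in zip(layer_names, cats)]
--     return cats
-- ===== Notes on version B (the rewrite author's own statement) =====
-- stated objective: alternative
-- what changed: Instead of a per-name first-match elif chain, B initialises every label to 'Other' and makes one whole-list overwrite pass per rule in reverse priority order, so the highest-priority rule is applied last and wins.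
import Mathlib
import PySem

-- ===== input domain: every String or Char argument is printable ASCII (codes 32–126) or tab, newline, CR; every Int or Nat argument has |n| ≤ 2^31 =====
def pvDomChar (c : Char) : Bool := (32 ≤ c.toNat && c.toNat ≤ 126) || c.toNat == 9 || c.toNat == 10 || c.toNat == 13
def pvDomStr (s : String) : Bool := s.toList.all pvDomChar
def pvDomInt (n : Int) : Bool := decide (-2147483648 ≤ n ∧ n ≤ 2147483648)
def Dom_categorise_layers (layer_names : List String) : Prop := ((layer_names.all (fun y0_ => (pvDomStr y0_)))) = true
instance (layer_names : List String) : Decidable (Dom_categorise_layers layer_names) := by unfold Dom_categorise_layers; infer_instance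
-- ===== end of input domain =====

-- B replaces A's per-name if/elif chain with staged whole-list overwrite passes, one per rule in reverse priority order (alternative decomposition, same cost).


-- ===== PORT A =====
def categorise_layers (layer_names : List String) : List String :=
  layer_names.foldl (fun categories name =>
    if PySem.Str.isIn "Attention Block" name then categories ++ ["Attention Block"]
    else if PySem.Str.isIn "mlp" name then categories ++ ["MLP"]
    else if PySem.Str.isIn "layernorm" name then categories ++ ["LayerNorm"]
    else categories ++ ["Other"]) []

-- ===== PORT B =====
-- reverse-priority rule passes: each pass overwrites matching positions; the last pass wins
def categorise_layers_alt (layer_names : List String) : List String :=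
  [("layernorm", "LayerNorm"), ("mlp", "MLP"), ("Attention Block", "Attention Block")].foldl
    (fun cats r =>
      List.zipWith (fun name cat => if PySem.Str.isIn r.1 name then r.2 else cat)
        layer_names cats)
    (layer_names.map (fun _ => "Other"))

-- ===== PRECONDITION & SPEC =====
def Spec_categorise_layers (layer_names : List String) (out : List String) : Prop := out = categorise_layers_alt layer_names
instance (layer_names : List String) (out : List String) : Decidable (Spec_categorise_layers layer_names out) := by unfold Spec_categorise_layers; infer_instance

-- ===== CLAIM (what is proved, stated in full; the proofs are below) =====
def Claim_equal_categorise_layers : Prop := ∀ (layer_names : List String), Dom_categorise_layers layer_names → Spec_categorise_layers layer_names (categorise_layers layer_names)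

-- ===== LEMMAS AND PROOFS =====

-- A's fold appends one label per name: it equals a map of the if-chain.
theorem pv_foldl_A (acc : List String) (l : List String) :
    l.foldl (fun categories name =>
      if PySem.Str.isIn "Attention Block" name then categories ++ ["Attention Block"]
      else if PySem.Str.isIn "mlp" name then categories ++ ["MLP"]
      else if PySem.Str.isIn "layernorm" name then categories ++ ["LayerNorm"]
      else categories ++ ["Other"]) acc
    = acc ++ l.map (fun name =>
        if PySem.Str.isIn "Attention Block" name then "Attention Block"
        else if PySem.Str.isIn "mlp" name then "MLP"
        else if PySem.Str.isIn "layernorm" name then "LayerNorm"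
        else "Other") := by
  induction l generalizing acc with
  | nil => simp
  | cons x xs ih =>
    simp only [List.foldl, List.map]
    rw [show (if PySem.Str.isIn "Attention Block" x then acc ++ ["Attention Block"]
        else if PySem.Str.isIn "mlp" x then acc ++ ["MLP"]
        else if PySem.Str.isIn "layernorm" x then acc ++ ["LayerNorm"]
        else acc ++ ["Other"])
      = acc ++ [if PySem.Str.isIn "Attention Block" x then "Attention Block"
        else if PySem.Str.isIn "mlp" x then "MLP"
        else if PySem.Str.isIn "layernorm" x then "LayerNorm"
        else "Other"] by split_ifs <;> rfl]
    rw [ih, List.append_assoc]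
    rfl

-- B's three staged passes collapse, position by position, to the same if-chain map.
theorem pv_stages_B (l : List String) :
    categorise_layers_alt l
    = l.map (fun name =>
        if PySem.Str.isIn "Attention Block" name then "Attention Block"
        else if PySem.Str.isIn "mlp" name then "MLP"
        else if PySem.Str.isIn "layernorm" name then "LayerNorm"
        else "Other") := by
  unfold categorise_layers_alt
  simp only [List.foldl]
  induction l with
  | nil => rfl
  | cons x xs ih =>
    simp only [List.map, List.zipWith]
    refine congrArg₂ List.cons ?_ ih
    by_cases h1 : PySem.Str.isIn "Attention Block" x <;>
      by_cases h2 : PySem.Str.isIn "mlp" x <;>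
        by_cases h3 : PySem.Str.isIn "layernorm" x <;> simp_all

-- ===== VERDICT (by name: the statement is the Claim_ definition above) =====
theorem categorise_layers_spec : Claim_equal_categorise_layers := by
  intro layer_names _
  unfold Spec_categorise_layers categorise_layers
  rw [pv_foldl_A, pv_stages_B]
  rfl
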